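-- pv_equiv track=rewrite | github.com/tezheng/ModelInsider | ground_truth_bert_tiny.py | _generate_expected_tag
-- ===== SOURCE A (Python) =====
-- from typing import Dict, List, Tuple, Any
--
-- def _generate_expected_tag(module_name: str, module_info: Dict[str, Any], should_filter: bool) -> str:
--     """Generate the expected hierarchy tag for a module according to R12."""
--
--     if should_filter:
--         return ""  # Filtered modules get empty tags
--
--     if not module_name:  # Root module
--         return "/" + module_info['class']
--
--     # Convert PyTorch module path to hierarchy tag
--     # Example: "bert.encoder.layer.0.attention.self" -> "/BertModel/BertEncoder/BertLayer.0/BertAttention/BertSelfAttention"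
--
--     parts = module_name.split('.')
--     tag_parts = ["/"]
--
--     # Special handling for BERT structure
--     for i, part in enumerate(parts):
--         if part == 'bert':
--             tag_parts.append('BertModel')
--         elif part == 'encoder':
--             tag_parts.append('BertEncoder')
--         elif part == 'layer':
--             # Next part should be a number
--             if i + 1 < len(parts) and parts[i + 1].isdigit():
--                 tag_parts.append(f'BertLayer.{parts[i + 1]}')
--                 # Skip the number part in next iteration
--                 parts[i + 1] = None
--         elif part == 'attention':
--             tag_parts.append('BertAttention')
--         elif part == 'self':
--             tag_parts.append('BertSelfAttention')
--         elif part == 'output':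
--             tag_parts.append('BertOutput')
--         elif part == 'intermediate':
--             tag_parts.append('BertIntermediate')
--         elif part == 'embeddings':
--             tag_parts.append('BertEmbeddings')
--         elif part == 'pooler':
--             tag_parts.append('BertPooler')
--         elif part and part != 'None':  # Skip None placeholders
--             # Convert to PascalCase if needed
--             tag_parts.append(part.title() if part.islower() else part)
--
--     # Join with forward slashes
--     tag = '/'.join(tag_parts)
--
--     # Clean up any double slashes
--     while '//' in tag:
--         tag = tag.replace('//', '/')
--
--     return tag
-- ===== SOURCE B (Python) =====
-- _TOK = {
--     'bert': 'BertModel',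
--     'encoder': 'BertEncoder',
--     'attention': 'BertAttention',
--     'self': 'BertSelfAttention',
--     'output': 'BertOutput',
--     'intermediate': 'BertIntermediate',
--     'embeddings': 'BertEmbeddings',
--     'pooler': 'BertPooler',
-- }
--
--
-- def _fuse(parts):
--     """Recursively pair a 'layer' token with a following digit string."""
--     if not parts:
--         return []
--     if parts[0] == 'layer' and len(parts) > 1 and parts[1].isdigit():
--         return [(True, parts[1])] + _fuse(parts[2:])
--     return [(False, parts[0])] + _fuse(parts[1:])
--
--
-- def _render(tok):
--     """Map one fused token to its tag piece, or None if it contributes nothing."""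
--     is_layer, s = tok
--     if is_layer:
--         return 'BertLayer.' + s
--     if s in _TOK:
--         return _TOK[s]
--     if s == 'layer':  # 'layer' not followed by a number contributes nothing
--         return None
--     if s and s != 'None':
--         return s.title() if s.islower() else s
--     return None
--
--
-- def _generate_expected_tag(module_name, module_info, should_filter):
--     if should_filter:
--         return ""
--     if not module_name:
--         return "/" + module_info['class']
--     pieces = [t for t in map(_render, _fuse(module_name.split('.'))) if t is not None]
--     tag = '/' + '/'.join(pieces)
--     # collapse slash runs: drop a '/' whose predecessor is '/'
--     return ''.join(c for p, c in zip(' ' + tag, tag) if not (p == '/' == c))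
-- ===== Notes on version B (the rewrite author's own statement) =====
-- stated objective: alternative
-- what changed: Replaces A's single indexed for-loop with in-place list mutation ('parts[i+1] = None') and a replace('//','/') fixpoint while-loop by a staged pipeline: a structural recursion that fuses 'layer'+digit pairs into tokens, a pure map rendering each token (or None), a filter, a join, and a single zip-with-predecessor comprehension that collapses slash runs.
import Mathlib
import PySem

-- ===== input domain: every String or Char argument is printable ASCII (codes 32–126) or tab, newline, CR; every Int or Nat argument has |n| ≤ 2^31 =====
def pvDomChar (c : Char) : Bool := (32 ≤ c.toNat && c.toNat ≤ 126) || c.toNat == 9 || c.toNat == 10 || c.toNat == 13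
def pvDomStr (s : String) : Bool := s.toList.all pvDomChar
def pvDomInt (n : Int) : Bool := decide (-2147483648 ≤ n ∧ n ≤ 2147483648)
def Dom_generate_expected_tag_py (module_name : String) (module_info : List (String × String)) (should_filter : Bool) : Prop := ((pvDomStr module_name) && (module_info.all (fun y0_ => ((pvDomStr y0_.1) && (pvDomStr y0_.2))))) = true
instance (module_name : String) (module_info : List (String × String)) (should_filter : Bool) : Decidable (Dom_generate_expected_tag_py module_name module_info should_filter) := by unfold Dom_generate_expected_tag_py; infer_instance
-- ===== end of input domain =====

-- B replaces A's single indexed loop with in-place 'parts[i+1] = None' mutation and the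
-- replace('//','/') fixpoint by a staged pipeline (fuse 'layer'+digit pairs recursively,
-- map each token to a piece or None, filter, join, one zip-with-predecessor collapse);
-- objective: alternative decomposition, return value only.

-- ===== PORT A =====
-- shared helpers for Python builtins PySem lacks: str.title() / str.islower(), exact on ASCII
def pyIslower (cs : List Char) : Bool :=
  cs.any PySem.Chars.islower && !(cs.any PySem.Chars.isupper)

def pyTitleGo (prev : Bool) : List Char → List Char
  | [] => []
  | c :: rest =>
    (if PySem.Chars.isalpha c then
        (if prev then PySem.Chars.lowerChar c else PySem.Chars.upperChar c)
      else c) :: pyTitleGo (PySem.Chars.isalpha c) rest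

def pyTitle (cs : List Char) : List Char := pyTitleGo false cs

-- one pass of tag.replace('//', '/') written structurally (proved equal to PySem.Chars.replace below;
-- needed so the port's 'while' termination can cite a length bound)
def repSS : List Char → List Char
  | '/' :: '/' :: t => '/' :: repSS t
  | c :: t => c :: repSS t
  | [] => []

theorem repSS_cons_of (c : Char) (t : List Char) (h : ¬(c = '/' ∧ t.head? = some '/')) :
    repSS (c :: t) = c :: repSS t := by
  rw [repSS.eq_def]
  split
  · rename_i t' heq
    injection heq with h1 h2
    exact absurd ⟨h1, by rw [h2]; rfl⟩ h
  · rename_i c' t' x heq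
    injection heq with h1 h2
    rw [h1, h2]
  · rename_i heq; cases heq

theorem repSS_length_le : ∀ cs : List Char, (repSS cs).length ≤ cs.length := by
  intro cs
  induction cs using repSS.induct with
  | case1 t ih => simp [repSS]; omega
  | case2 c t h ih => rw [repSS.eq_def]; split <;> simp_all
  | case3 => simp [repSS]

theorem repSS_length_lt_of_infix : ∀ cs : List Char, ['/', '/'] <:+: cs → (repSS cs).length < cs.length := by
  intro cs
  induction cs using repSS.induct with
  | case1 t ih =>
    intro _
    have := repSS_length_le t
    simp [repSS]; omega
  | case2 c t h ih =>
    intro hinf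
    rcases List.infix_cons_iff.mp hinf with hp | hi
    · exfalso
      rcases hp with ⟨s, hs⟩
      cases t with
      | nil => simp at hs
      | cons c2 t2 =>
        simp at hs
        exact h t2 hs.1.symm (by rw [← hs.2.1])
    · have := ih hi
      rw [repSS.eq_def]
      split <;> simp_all <;> omega
  | case3 => intro h; rcases h with ⟨s, t, hs⟩; simp at hs

theorem replace_go_eq : ∀ (fuel : Nat) (l acc : List Char), l.length ≤ fuel →
    PySem.Chars.replace.go ['/','/'] ['/'] fuel l acc = acc.reverse ++ repSS l := by
  intro fuel
  induction fuel with
  | zero =>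
    intro l acc h
    have : l = [] := List.eq_nil_of_length_eq_zero (by omega)
    subst this
    simp [PySem.Chars.replace.go, repSS]
  | succ n ih =>
    intro l acc h
    match l with
    | [] => simp [PySem.Chars.replace.go, repSS]
    | c :: t =>
      rw [PySem.Chars.replace.go]
      by_cases hp : List.isPrefixOf ['/', '/'] (c :: t)
      · rw [if_pos hp]
        rcases t with _ | ⟨c2, t2⟩
        · simp [List.isPrefixOf] at hp
        · simp [List.isPrefixOf] at hp
          obtain ⟨h1, h2⟩ := hp
          subst h1; subst h2
          rw [ih _ _ (by simp at h ⊢; omega)]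
          simp [repSS]
      · rw [if_neg hp]
        rw [ih _ _ (by simp at h ⊢; omega)]
        rw [repSS_cons_of c t (by
          rintro ⟨h1, h2⟩
          rcases t with _ | ⟨c2, t2⟩ <;> simp at h2
          subst h1; subst h2
          simp [List.isPrefixOf] at hp)]
        simp

theorem replace_eq_repSS (cs : List Char) : PySem.Chars.replace cs ['/', '/'] ['/'] = repSS cs := by
  rw [PySem.Chars.replace]
  simpa using replace_go_eq cs.length cs [] le_rfl

-- the port of A's 'while "//" in tag: tag = tag.replace("//", "/")'
def collapseA (cs : List Char) : List Char :=
  if h : PySem.Chars.isIn ['/', '/'] cs then collapseA (PySem.Chars.replace cs ['/', '/'] ['/'])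
  else cs
termination_by cs.length
decreasing_by
  rw [replace_eq_repSS]
  exact repSS_length_lt_of_infix _ ((PySem.Chars.isIn_iff_infix _ _).mp h)

-- A's for-loop over enumerate(parts) with the in-place 'parts[i+1] = None' mutation:
-- parts is a list of Option (List Char), none = Python None placeholder
def loopA (parts : List (Option (List Char))) (i : Nat) (acc : List (List Char)) : List (List Char) :=
  if h : i < parts.length then
    match parts[i] with
    | none => loopA parts (i + 1) acc                        -- None: every branch condition is false
    | some part =>
      if part = ['b','e','r','t'] then loopA parts (i + 1) (acc ++ [['B','e','r','t','M','o','d','e','l']])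
      else if part = ['e','n','c','o','d','e','r'] then loopA parts (i + 1) (acc ++ [['B','e','r','t','E','n','c','o','d','e','r']])
      else if part = ['l','a','y','e','r'] then
        if _h2 : i + 1 < parts.length then
          match parts[i + 1] with
          | some nxt =>
            if PySem.Chars.strIsdigit nxt then
              loopA (parts.set (i + 1) none) (i + 1) (acc ++ [['B','e','r','t','L','a','y','e','r','.'] ++ nxt])
            else loopA parts (i + 1) acc
          | none => loopA parts (i + 1) acc                  -- unreachable from the port's call sites
        else loopA parts (i + 1) acc
      else if part = ['a','t','t','e','n','t','i','o','n'] then loopA parts (i + 1) (acc ++ [['B','e','r','t','A','t','t','e','n','t','i','o','n']])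
      else if part = ['s','e','l','f'] then loopA parts (i + 1) (acc ++ [['B','e','r','t','S','e','l','f','A','t','t','e','n','t','i','o','n']])
      else if part = ['o','u','t','p','u','t'] then loopA parts (i + 1) (acc ++ [['B','e','r','t','O','u','t','p','u','t']])
      else if part = ['i','n','t','e','r','m','e','d','i','a','t','e'] then loopA parts (i + 1) (acc ++ [['B','e','r','t','I','n','t','e','r','m','e','d','i','a','t','e']])
      else if part = ['e','m','b','e','d','d','i','n','g','s'] then loopA parts (i + 1) (acc ++ [['B','e','r','t','E','m','b','e','d','d','i','n','g','s']])
      else if part = ['p','o','o','l','e','r'] then loopA parts (i + 1) (acc ++ [['B','e','r','t','P','o','o','l','e','r']])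
      else if part ≠ [] ∧ part ≠ ['N','o','n','e'] then
        loopA parts (i + 1) (acc ++ [if pyIslower part then pyTitle part else part])
      else loopA parts (i + 1) acc
  else acc
termination_by parts.length - i
decreasing_by all_goals first | omega | (simp [List.length_set]; omega)

def generate_expected_tag_py (module_name : String) (module_info : List (String × String)) (should_filter : Bool) : String :=
  if should_filter then ""
  else if module_name = "" then
    match PySem.Dict.get? (PySem.Dict.mk module_info) "class" with
    | some c => String.ofList ('/' :: c.toList)     -- "/" + module_info['class']
    | none => ""                                -- Python raises KeyError here; excluded by Pre_
  else
    let parts := PySem.Chars.splitOn module_name.toList ['.']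
    let tagParts := loopA (parts.map some) 0 [['/']]
    String.ofList (collapseA (PySem.Chars.join ['/'] tagParts))

-- ===== PORT B =====
def tokensB : PySem.Dict (List Char) (List Char) := PySem.Dict.mk
  [ (['b','e','r','t'], ['B','e','r','t','M','o','d','e','l'])
  , (['e','n','c','o','d','e','r'], ['B','e','r','t','E','n','c','o','d','e','r'])
  , (['a','t','t','e','n','t','i','o','n'], ['B','e','r','t','A','t','t','e','n','t','i','o','n'])
  , (['s','e','l','f'], ['B','e','r','t','S','e','l','f','A','t','t','e','n','t','i','o','n'])
  , (['o','u','t','p','u','t'], ['B','e','r','t','O','u','t','p','u','t'])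
  , (['i','n','t','e','r','m','e','d','i','a','t','e'], ['B','e','r','t','I','n','t','e','r','m','e','d','i','a','t','e'])
  , (['e','m','b','e','d','d','i','n','g','s'], ['B','e','r','t','E','m','b','e','d','d','i','n','g','s'])
  , (['p','o','o','l','e','r'], ['B','e','r','t','P','o','o','l','e','r']) ]

-- B stage 1 (_fuse): structural recursion pairing a 'layer' token with a following digit string
def fuseB : List (List Char) → List (Bool × List Char)
  | [] => []
  | [p] => [(false, p)]
  | p :: q :: rest =>
    if p = ['l','a','y','e','r'] ∧ PySem.Chars.strIsdigit q then
      (true, q) :: fuseB rest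
    else (false, p) :: fuseB (q :: rest)
termination_by l => l.length

-- B stage 2 (_render): map one fused token to its tag piece, or none
def renderB (tok : Bool × List Char) : Option (List Char) :=
  if tok.1 then some (['B','e','r','t','L','a','y','e','r','.'] ++ tok.2)
  else
    match PySem.Dict.get? tokensB tok.2 with
    | some t => some t
    | none =>
      if tok.2 = ['l','a','y','e','r'] then none   -- 'layer' not followed by a number contributes nothing
      else if tok.2 ≠ [] ∧ tok.2 ≠ ['N','o','n','e'] then
        some (if pyIslower tok.2 then pyTitle tok.2 else tok.2)
      else none

def generate_expected_tag_py_alt (module_name : String) (module_info : List (String × String)) (should_filter : Bool) : String :=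
  if should_filter then ""
  else if module_name = "" then
    match PySem.Dict.get? (PySem.Dict.mk module_info) "class" with
    | some c => String.ofList ('/' :: c.toList)
    | none => ""                                -- Python raises KeyError here; excluded by Pre_
  else
    let parts := PySem.Chars.splitOn module_name.toList ['.']
    let pieces := ((fuseB parts).map renderB).filterMap id   -- stages 3: filter the Nones
    let tag := '/' :: PySem.Chars.join ['/'] pieces
    -- zip-with-predecessor collapse of slash runs (zip(' ' + tag, tag))
    String.ofList (((' ' :: tag).zip tag).filterMap
      (fun pc => if pc.1 = '/' ∧ pc.2 = '/' then none else some pc.2))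

-- ===== PRECONDITION & SPEC =====
-- Pre_ excludes only the inputs where Python A raises KeyError (empty module_name, not filtered,
-- and no 'class' key in module_info); B raises KeyError there too.
def Pre_generate_expected_tag_py (module_name : String) (module_info : List (String × String)) (should_filter : Bool) : Prop :=
  should_filter = true ∨ module_name ≠ "" ∨ "class" ∈ module_info.map Prod.fst
instance (module_name : String) (module_info : List (String × String)) (should_filter : Bool) : Decidable (Pre_generate_expected_tag_py module_name module_info should_filter) := by unfold Pre_generate_expected_tag_py; infer_instance

def pvWitness_generate_expected_tag_py : String × (List (String × String)) × Bool :=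
  ("bert.encoder.layer.0.attention.self", [("class", "BertModel")], false)

def Spec_generate_expected_tag_py (module_name : String) (module_info : List (String × String)) (should_filter : Bool) (out : String) : Prop := out = generate_expected_tag_py_alt module_name module_info should_filter
instance (module_name : String) (module_info : List (String × String)) (should_filter : Bool) (out : String) : Decidable (Spec_generate_expected_tag_py module_name module_info should_filter out) := by unfold Spec_generate_expected_tag_py; infer_instance

-- ===== CLAIM (what is proved, stated in full; the proofs are below) =====
def Claim_equal_generate_expected_tag_py : Prop := ∀ (module_name : String) (module_info : List (String × String)) (should_filter : Bool), Dom_generate_expected_tag_py module_name module_info should_filter → Pre_generate_expected_tag_py module_name module_info should_filter → Spec_generate_expected_tag_py module_name module_info should_filter (generate_expected_tag_py module_name module_info should_filter)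

-- ===== LEMMAS AND PROOFS =====

-- run-collapse specification: sqSl b cs keeps a char unless it is '/' directly after a kept-run '/'
def sqSl : Bool → List Char → List Char
  | _, [] => []
  | b, c :: t => if b ∧ c = '/' then sqSl (c = '/') t else c :: sqSl (c = '/') t

theorem sq_repSS : ∀ (cs : List Char) (b : Bool), sqSl b (repSS cs) = sqSl b cs := by
  intro cs
  induction cs using repSS.induct with
  | case1 t ih => intro b; cases b <;> simp [repSS, sqSl, ih]
  | case2 c t h ih =>
    intro b
    rw [repSS_cons_of c t (by
      rintro ⟨h1, h2⟩
      rcases t with _ | ⟨c2, t2⟩ <;> simp at h2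
      exact h t2 h1 (by rw [h2]))]
    cases b <;> by_cases hc : c = '/' <;> simp [sqSl, hc, ih]
  | case3 => intro b; simp [repSS]

theorem sq_of_no_double : ∀ (cs : List Char) (b : Bool), ¬ (['/', '/'] <:+: cs) →
    (b = true → cs.head? ≠ some '/') → sqSl b cs = cs := by
  intro cs
  induction cs with
  | nil => intro b _ _; simp [sqSl]
  | cons c t ih =>
    intro b hinf hhd
    have hnt : ¬ (['/', '/'] <:+: t) := fun h => hinf (List.infix_cons_iff.mpr (Or.inr h))
    have hcond : ¬ (b = true ∧ c = '/') := by
      rintro ⟨hb, hc⟩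
      exact hhd hb (by simp [hc])
    have hstep : decide (c = '/') = true → t.head? ≠ some '/' := by
      intro hc hh
      simp at hc
      rcases t with _ | ⟨c2, t2⟩ <;> simp at hh
      exact hinf (List.infix_cons_iff.mpr (Or.inl (by simp [hc, hh])))
    have := ih (decide (c = '/')) hnt hstep
    cases b <;> by_cases hc : c = '/' <;> simp_all [sqSl]

theorem collapseA_eq_sq (cs : List Char) : collapseA cs = sqSl false cs := by
  induction cs using collapseA.induct with
  | case1 cs h ih =>
    rw [collapseA, dif_pos h, ih, replace_eq_repSS, sq_repSS]
  | case2 cs h =>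
    rw [collapseA, dif_neg h]
    exact (sq_of_no_double cs false (by
      intro hinf
      exact h (by simp [PySem.Chars.isIn_iff_infix, hinf])) (by simp)).symm

-- B's zip-with-predecessor collapse computes the same run-collapse
theorem zip_collapse_eq_sq : ∀ (cs : List Char) (p : Char),
    ((p :: cs).zip cs).filterMap (fun pc => if pc.1 = '/' ∧ pc.2 = '/' then none else some pc.2)
      = sqSl (decide (p = '/')) cs := by
  intro cs
  induction cs with
  | nil => intro p; simp [sqSl]
  | cons c t ih =>
    intro p
    have := ih c
    by_cases hp : p = '/' <;> by_cases hc : c = '/' <;>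
      simp_all [List.zip, sqSl]

theorem loopA_suffix : ∀ (n : Nat) (l₁ l₂ : List (Option (List Char))) (i : Nat) (acc : List (List Char)),
    l₁.length = l₂.length → l₁.length - i ≤ n → (∀ j, i ≤ j → l₁[j]? = l₂[j]?) →
    loopA l₁ i acc = loopA l₂ i acc := by
  intro n
  induction n with
  | zero =>
    intro l₁ l₂ i acc hlen hn hagree
    rw [loopA, dif_neg (by omega)]
    rw [loopA, dif_neg (by omega)]
  | succ n ih =>
    intro l₁ l₂ i acc hlen hn hagree
    by_cases h : i < l₁.length
    case neg =>
      rw [loopA, dif_neg (by omega)]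
      rw [loopA, dif_neg (by omega)]
    have h2 : i < l₂.length := by omega
    have heq : l₁[i] = l₂[i] := by
      have := hagree i le_rfl
      rwa [List.getElem?_eq_getElem h, List.getElem?_eq_getElem h2, Option.some_inj] at this
    have hstep : ∀ acc', loopA l₁ (i + 1) acc' = loopA l₂ (i + 1) acc' :=
      fun acc' => ih l₁ l₂ (i + 1) acc' hlen (by omega) (fun j hj => hagree j (by omega))
    conv_lhs => rw [loopA]
    conv_rhs => rw [loopA]
    rw [dif_pos h, dif_pos h2, ← heq]
    cases hx : l₁[i] with
    | none => exact hstep acc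
    | some part =>
      dsimp only
      by_cases hb1 : part = ['b','e','r','t']
      · rw [if_pos hb1, if_pos hb1]; exact hstep _
      rw [if_neg hb1, if_neg hb1]
      by_cases hb2 : part = ['e','n','c','o','d','e','r']
      · rw [if_pos hb2, if_pos hb2]; exact hstep _
      rw [if_neg hb2, if_neg hb2]
      by_cases hb3 : part = ['l','a','y','e','r']
      · rw [if_pos hb3, if_pos hb3]
        by_cases hk : i + 1 < l₁.length
        · have hk2 : i + 1 < l₂.length := by omega
          rw [dif_pos hk, dif_pos hk2]
          have heq2 : l₁[i + 1] = l₂[i + 1] := by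
            have := hagree (i + 1) (by omega)
            rwa [List.getElem?_eq_getElem hk, List.getElem?_eq_getElem hk2, Option.some_inj] at this
          rw [← heq2]
          cases hx2 : l₁[i + 1] with
          | none => exact hstep _
          | some nxt =>
            dsimp only
            by_cases hd : PySem.Chars.strIsdigit nxt
            · rw [if_pos hd, if_pos hd]
              apply ih
              · simp [hlen]
              · simp; omega
              · intro j hj
                rw [List.getElem?_set, List.getElem?_set]
                by_cases hji : i + 1 = j
                · rw [if_pos hji, if_pos hji, if_pos hk, if_pos hk2]
                · simp only [if_neg hji]
                  exact hagree j (by omega)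
            · rw [if_neg hd, if_neg hd]; exact hstep _
        · rw [dif_neg hk, dif_neg (show ¬ i + 1 < l₂.length by omega)]
          exact hstep _
      rw [if_neg hb3, if_neg hb3]
      by_cases hb4 : part = ['a','t','t','e','n','t','i','o','n']
      · rw [if_pos hb4, if_pos hb4]; exact hstep _
      rw [if_neg hb4, if_neg hb4]
      by_cases hb5 : part = ['s','e','l','f']
      · rw [if_pos hb5, if_pos hb5]; exact hstep _
      rw [if_neg hb5, if_neg hb5]
      by_cases hb6 : part = ['o','u','t','p','u','t']
      · rw [if_pos hb6, if_pos hb6]; exact hstep _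
      rw [if_neg hb6, if_neg hb6]
      by_cases hb7 : part = ['i','n','t','e','r','m','e','d','i','a','t','e']
      · rw [if_pos hb7, if_pos hb7]; exact hstep _
      rw [if_neg hb7, if_neg hb7]
      by_cases hb8 : part = ['e','m','b','e','d','d','i','n','g','s']
      · rw [if_pos hb8, if_pos hb8]; exact hstep _
      rw [if_neg hb8, if_neg hb8]
      by_cases hb9 : part = ['p','o','o','l','e','r']
      · rw [if_pos hb9, if_pos hb9]; exact hstep _
      rw [if_neg hb9, if_neg hb9]
      by_cases hb10 : part ≠ [] ∧ part ≠ ['N','o','n','e']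
      · rw [if_pos hb10, if_pos hb10]; exact hstep _
      · rw [if_neg hb10, if_neg hb10]; exact hstep _

theorem fuseB_cons_not_layer (p : List Char) (rest : List (List Char)) (h : p ≠ ['l','a','y','e','r']) :
    fuseB (p :: rest) = (false, p) :: fuseB rest := by
  cases rest with
  | nil => simp [fuseB]
  | cons q r => rw [fuseB, if_neg (by rintro ⟨h1, _⟩; exact h h1)]

-- A's mutating indexed loop computes B's fuse→render→filter pipeline on the remaining suffix
theorem loopA_eq_pipeline : ∀ (n : Nat) (l : List (List Char)) (i : Nat) (acc : List (List Char)),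
    l.length - i ≤ n →
    loopA (l.map some) i acc = acc ++ ((fuseB (l.drop i)).map renderB).filterMap id := by
  intro n
  induction n with
  | zero =>
    intro l i acc hn
    rw [loopA, dif_neg (by simp; omega), List.drop_eq_nil_of_le (by omega)]
    simp [fuseB]
  | succ n ih =>
    intro l i acc hn
    by_cases h : i < l.length
    case neg =>
      rw [loopA, dif_neg (by simp; omega), List.drop_eq_nil_of_le (by omega)]
      simp [fuseB]
    have hm : i < (l.map some).length := by simpa using h
    have hdrop : l.drop i = l[i] :: l.drop (i + 1) := List.drop_eq_getElem_cons h
    conv_lhs => rw [loopA]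
    rw [dif_pos hm, List.getElem_map]
    dsimp only
    -- a reusable step for every non-'layer' branch
    have hstep : ∀ (hne : l[i] ≠ ['l','a','y','e','r']) (piece : Option (List Char)),
        renderB (false, l[i]) = piece →
        acc ++ ((fuseB (l.drop i)).map renderB).filterMap id
          = (acc ++ piece.toList) ++ ((fuseB (l.drop (i + 1))).map renderB).filterMap id := by
      intro hne piece hp
      rw [hdrop, fuseB_cons_not_layer _ _ hne]
      cases piece <;> simp_all
    by_cases hb1 : l[i] = ['b','e','r','t']
    · rw [if_pos hb1, ih l (i+1) _ (by omega),
        hstep (by rw [hb1]; decide) (some ['B','e','r','t','M','o','d','e','l']) (by rw [hb1]; decide)]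
      simp
    rw [if_neg hb1]
    by_cases hb2 : l[i] = ['e','n','c','o','d','e','r']
    · rw [if_pos hb2, ih l (i+1) _ (by omega),
        hstep (by rw [hb2]; decide) (some ['B','e','r','t','E','n','c','o','d','e','r']) (by rw [hb2]; decide)]
      simp
    rw [if_neg hb2]
    by_cases hb3 : l[i] = ['l','a','y','e','r']
    · rw [if_pos hb3]
      by_cases hk : i + 1 < l.length
      · have hmk : i + 1 < (l.map some).length := by simpa using hk
        rw [dif_pos hmk, List.getElem_map]
        dsimp only
        have hdrop2 : l.drop (i + 1) = l[i + 1] :: l.drop (i + 2) := List.drop_eq_getElem_cons hk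
        by_cases hd : PySem.Chars.strIsdigit l[i + 1]
        · rw [if_pos hd]
          have hlen2 : i + 1 < ((l.map some).set (i + 1) none).length := by simp; omega
          conv_lhs => rw [loopA]
          rw [dif_pos hlen2, List.getElem_set_self]
          dsimp only
          rw [loopA_suffix l.length ((l.map some).set (i + 1) none) (l.map some) (i + 2) _
            (by simp) (by simp only [List.length_set, List.length_map]; omega)
            (fun j hj => by rw [List.getElem?_set]; simp [show ¬(i + 1 = j) by omega])]
          rw [ih l (i + 2) _ (by omega)]
          rw [hdrop, hdrop2, fuseB, if_pos ⟨hb3, hd⟩]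
          simp [renderB]
        · rw [if_neg hd, ih l (i + 1) acc (by omega)]
          rw [hdrop, hdrop2, fuseB, if_neg (by rintro ⟨_, hdd⟩; exact hd hdd), ← hdrop2]
          simp [renderB, hb3, show PySem.Dict.get? tokensB ['l','a','y','e','r'] = none from by decide]
      · rw [dif_neg (show ¬ i + 1 < (l.map some).length by simpa using hk),
          ih l (i + 1) acc (by omega)]
        rw [hdrop, List.drop_eq_nil_of_le (by omega)]
        simp [fuseB, renderB, hb3, show PySem.Dict.get? tokensB ['l','a','y','e','r'] = none from by decide]
    rw [if_neg hb3]
    by_cases hb4 : l[i] = ['a','t','t','e','n','t','i','o','n']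
    · rw [if_pos hb4, ih l (i+1) _ (by omega),
        hstep (by rw [hb4]; decide) (some ['B','e','r','t','A','t','t','e','n','t','i','o','n']) (by rw [hb4]; decide)]
      simp
    rw [if_neg hb4]
    by_cases hb5 : l[i] = ['s','e','l','f']
    · rw [if_pos hb5, ih l (i+1) _ (by omega),
        hstep (by rw [hb5]; decide) (some ['B','e','r','t','S','e','l','f','A','t','t','e','n','t','i','o','n']) (by rw [hb5]; decide)]
      simp
    rw [if_neg hb5]
    by_cases hb6 : l[i] = ['o','u','t','p','u','t']
    · rw [if_pos hb6, ih l (i+1) _ (by omega),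
        hstep (by rw [hb6]; decide) (some ['B','e','r','t','O','u','t','p','u','t']) (by rw [hb6]; decide)]
      simp
    rw [if_neg hb6]
    by_cases hb7 : l[i] = ['i','n','t','e','r','m','e','d','i','a','t','e']
    · rw [if_pos hb7, ih l (i+1) _ (by omega),
        hstep (by rw [hb7]; decide) (some ['B','e','r','t','I','n','t','e','r','m','e','d','i','a','t','e']) (by rw [hb7]; decide)]
      simp
    rw [if_neg hb7]
    by_cases hb8 : l[i] = ['e','m','b','e','d','d','i','n','g','s']
    · rw [if_pos hb8, ih l (i+1) _ (by omega),
        hstep (by rw [hb8]; decide) (some ['B','e','r','t','E','m','b','e','d','d','i','n','g','s']) (by rw [hb8]; decide)]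
      simp
    rw [if_neg hb8]
    by_cases hb9 : l[i] = ['p','o','o','l','e','r']
    · rw [if_pos hb9, ih l (i+1) _ (by omega),
        hstep (by rw [hb9]; decide) (some ['B','e','r','t','P','o','o','l','e','r']) (by rw [hb9]; decide)]
      simp
    rw [if_neg hb9]
    have hfind : List.find? (fun p => p.1 == l[i]) tokensB.items = none := by
      rw [List.find?_eq_none]
      intro x hx
      simp only [tokensB] at hx
      simp at hx
      rcases hx with rfl | rfl | rfl | rfl | rfl | rfl | rfl | rfl <;>
        simp only [beq_iff_eq] <;>
        first
          | exact fun hh => hb1 hh.symm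
          | exact fun hh => hb2 hh.symm
          | exact fun hh => hb4 hh.symm
          | exact fun hh => hb5 hh.symm
          | exact fun hh => hb6 hh.symm
          | exact fun hh => hb7 hh.symm
          | exact fun hh => hb8 hh.symm
          | exact fun hh => hb9 hh.symm
    have hg : PySem.Dict.get? tokensB l[i] = none := by
      simp [PySem.Dict.get?, hfind]
    by_cases hb10 : l[i] ≠ [] ∧ l[i] ≠ ['N','o','n','e']
    · rw [if_pos hb10, ih l (i+1) _ (by omega),
        hstep hb3 (some (if pyIslower l[i] then pyTitle l[i] else l[i]))
          (by simp [renderB, hg, hb3, hb10])]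
      simp
    · rw [if_neg hb10, ih l (i+1) acc (by omega),
        hstep hb3 none (by
          simp only [renderB, hg, Bool.false_eq_true, if_false]
          rw [if_neg hb3, if_neg hb10])]
      simp

theorem join_sq_shift (ts : List (List Char)) :
    sqSl false (PySem.Chars.join ['/'] (['/'] :: ts)) = sqSl false ('/' :: PySem.Chars.join ['/'] ts) := by
  cases ts with
  | nil => simp [PySem.Chars.join_singleton, PySem.Chars.join_nil, sqSl]
  | cons t ts' =>
    rw [PySem.Chars.join_cons_cons]
    simp [sqSl]

-- ===== VERDICT (by name: the statement is the Claim_ definition above) =====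
theorem generate_expected_tag_py_spec : Claim_equal_generate_expected_tag_py := by
  intro mn mi sf hdom hpre
  unfold Spec_generate_expected_tag_py generate_expected_tag_py generate_expected_tag_py_alt
  by_cases hsf : sf = true
  · simp [hsf]
  rw [if_neg hsf, if_neg hsf]
  by_cases hmn : mn = ""
  · rw [if_pos hmn, if_pos hmn]
  rw [if_neg hmn, if_neg hmn]
  dsimp only
  rw [loopA_eq_pipeline (PySem.Chars.splitOn mn.toList ['.']).length _ 0 [['/']] (by omega)]
  rw [List.drop_zero, collapseA_eq_sq, zip_collapse_eq_sq]
  rw [show (decide ((' ' : Char) = '/')) = false from by decide]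
  congr 1
  exact join_sq_shift _
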